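-- pv_equiv track=rewrite | github.com/CoReason-AI/coreason-manifest | patch25.py | get_le_val
-- ===== SOURCE A (Python) =====
-- def get_le_val(fld_name, is_int):
--     if fld_name == "spawning_threshold":
--         return "100"
--     if fld_name == "context_window_token_ceiling":
--         return "2000000"
--     if fld_name == "divergence_temperature_override":
--         return "10.0"
--     if "magnitude" in fld_name:
--         return "1000000000"
--     if "ms" in fld_name:
--         return "86400000"
--     if "seconds" in fld_name:
--         return "86400"
--     if "carbon" in fld_name:
--         return "10000.0"
--     if any(
--         k in fld_name
--         for k in [
--             "ratio",
--             "score",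
--             "probability",
--             "factor",
--             "weight",
--             "epsilon",
--             "prior",
--             "similarity",
--             "delta",
--             "rate",
--             "tolerance",
--             "penalty",
--         ]
--     ):
--         return "1.0"
--     return "1000000000" if is_int else "1000000000.0"
-- ===== SOURCE B (Python) =====
-- # Reverse-priority overwrite scan: start from the default, sweep ALL rules from
-- # lowest to highest priority, overwriting the accumulator on every match; the
-- # last overwrite wins, so no early return is needed.
--
-- _SUBSTR_RULES = [  # lowest priority first
--     ("penalty", "1.0"),
--     ("tolerance", "1.0"),
--     ("rate", "1.0"),
--     ("delta", "1.0"),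
--     ("similarity", "1.0"),
--     ("prior", "1.0"),
--     ("epsilon", "1.0"),
--     ("weight", "1.0"),
--     ("factor", "1.0"),
--     ("probability", "1.0"),
--     ("score", "1.0"),
--     ("ratio", "1.0"),
--     ("carbon", "10000.0"),
--     ("seconds", "86400"),
--     ("ms", "86400000"),
--     ("magnitude", "1000000000"),
-- ]
--
-- _EXACT_RULES = [  # lowest priority first; exact names beat every substring rule
--     ("divergence_temperature_override", "10.0"),
--     ("context_window_token_ceiling", "2000000"),
--     ("spawning_threshold", "100"),
-- ]
--
--
-- def get_le_val(fld_name, is_int):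
--     val = "1000000000" if is_int else "1000000000.0"
--     for sub, v in _SUBSTR_RULES:
--         if sub in fld_name:
--             val = v
--     for name, v in _EXACT_RULES:
--         if fld_name == name:
--             val = v
--     return val
-- ===== Notes on version B (the rewrite author's own statement) =====
-- stated objective: alternative
-- what changed: B replaces A's early-return first-match if-chain by a reverse-priority overwrite scan: it starts from the default and folds over ALL rules from lowest to highest priority, overwriting an accumulator on every match, so the last overwrite (highest priority) wins and no early exit is needed.
import Mathlib
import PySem

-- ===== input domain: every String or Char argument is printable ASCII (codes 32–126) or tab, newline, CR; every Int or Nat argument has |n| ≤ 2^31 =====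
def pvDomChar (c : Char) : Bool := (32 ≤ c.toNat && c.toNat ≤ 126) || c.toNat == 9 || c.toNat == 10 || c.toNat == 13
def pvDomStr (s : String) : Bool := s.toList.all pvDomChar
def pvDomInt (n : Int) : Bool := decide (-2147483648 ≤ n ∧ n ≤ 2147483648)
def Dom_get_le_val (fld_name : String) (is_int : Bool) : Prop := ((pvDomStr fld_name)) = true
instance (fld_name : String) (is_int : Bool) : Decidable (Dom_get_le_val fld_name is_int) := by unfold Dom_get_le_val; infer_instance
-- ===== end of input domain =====

-- B replaces A's early-return if-chain by a reverse-priority overwrite scan over all rules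
-- (accumulator, last match wins); same behaviour, stated as an alternative decomposition.


-- ===== PORT A =====
def get_le_val (fld_name : String) (is_int : Bool) : String :=
  if fld_name == "spawning_threshold" then "100"
  else if fld_name == "context_window_token_ceiling" then "2000000"
  else if fld_name == "divergence_temperature_override" then "10.0"
  else if PySem.Str.isIn "magnitude" fld_name then "1000000000"
  else if PySem.Str.isIn "ms" fld_name then "86400000"
  else if PySem.Str.isIn "seconds" fld_name then "86400"
  else if PySem.Str.isIn "carbon" fld_name then "10000.0"
  else if (["ratio", "score", "probability", "factor", "weight", "epsilon",
            "prior", "similarity", "delta", "rate", "tolerance", "penalty"].any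
            (fun k => PySem.Str.isIn k fld_name)) then "1.0"
  else if is_int then "1000000000" else "1000000000.0"

-- ===== PORT B =====
def pvSubstrRules : List (String × String) :=  -- lowest priority first
  [("penalty", "1.0"), ("tolerance", "1.0"), ("rate", "1.0"), ("delta", "1.0"),
   ("similarity", "1.0"), ("prior", "1.0"), ("epsilon", "1.0"), ("weight", "1.0"),
   ("factor", "1.0"), ("probability", "1.0"), ("score", "1.0"), ("ratio", "1.0"),
   ("carbon", "10000.0"), ("seconds", "86400"), ("ms", "86400000"),
   ("magnitude", "1000000000")]

def pvExactRules : List (String × String) :=  -- lowest priority first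
  [("divergence_temperature_override", "10.0"),
   ("context_window_token_ceiling", "2000000"),
   ("spawning_threshold", "100")]

def get_le_val_alt (fld_name : String) (is_int : Bool) : String :=
  let base := if is_int then "1000000000" else "1000000000.0"
  let v1 := pvSubstrRules.foldl
    (fun acc p => if PySem.Str.isIn p.1 fld_name then p.2 else acc) base
  pvExactRules.foldl (fun acc p => if fld_name == p.1 then p.2 else acc) v1

-- ===== PRECONDITION & SPEC =====
def Spec_get_le_val (fld_name : String) (is_int : Bool) (out : String) : Prop := out = get_le_val_alt fld_name is_int
instance (fld_name : String) (is_int : Bool) (out : String) : Decidable (Spec_get_le_val fld_name is_int out) := by unfold Spec_get_le_val; infer_instance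

-- ===== CLAIM (what is proved, stated in full; the proofs are below) =====
def Claim_equal_get_le_val : Prop := ∀ (fld_name : String) (is_int : Bool), Dom_get_le_val fld_name is_int → Spec_get_le_val fld_name is_int (get_le_val fld_name is_int)

-- ===== LEMMAS AND PROOFS =====

-- ===== VERDICT (by name: the statement is the Claim_ definition above) =====
set_option maxRecDepth 16384 in
theorem get_le_val_spec : Claim_equal_get_le_val := by
  intro f i _
  unfold Spec_get_le_val
  by_cases h1 : f = "spawning_threshold"
  · subst h1; cases i <;> rfl
  by_cases h2 : f = "context_window_token_ceiling"
  · subst h2; cases i <;> rfl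
  by_cases h3 : f = "divergence_temperature_override"
  · subst h3; cases i <;> rfl
  have e1 : (f == "spawning_threshold") = false := beq_eq_false_iff_ne.mpr h1
  have e2 : (f == "context_window_token_ceiling") = false := beq_eq_false_iff_ne.mpr h2
  have e3 : (f == "divergence_temperature_override") = false := beq_eq_false_iff_ne.mpr h3
  unfold get_le_val get_le_val_alt pvSubstrRules pvExactRules
  simp only [e1, e2, e3, Bool.false_eq_true, if_false, List.any_cons, List.any_nil,
    List.foldl_cons, List.foldl_nil]
  rcases Bool.eq_false_or_eq_true (PySem.Str.isIn "magnitude" f) with hb1 | hb1 <;> simp only [hb1, Bool.false_eq_true, if_false, if_true] <;> try rfl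
  rcases Bool.eq_false_or_eq_true (PySem.Str.isIn "ms" f) with hb2 | hb2 <;> simp only [hb2, Bool.false_eq_true, if_false, if_true] <;> try rfl
  rcases Bool.eq_false_or_eq_true (PySem.Str.isIn "seconds" f) with hb3 | hb3 <;> simp only [hb3, Bool.false_eq_true, if_false, if_true] <;> try rfl
  rcases Bool.eq_false_or_eq_true (PySem.Str.isIn "carbon" f) with hb4 | hb4 <;> simp only [hb4, Bool.false_eq_true, if_false, if_true] <;> try rfl
  rcases Bool.eq_false_or_eq_true (PySem.Str.isIn "ratio" f) with hb5 | hb5 <;> simp only [hb5, Bool.false_eq_true, Bool.false_or, Bool.true_or, if_false, if_true] <;> try rfl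
  rcases Bool.eq_false_or_eq_true (PySem.Str.isIn "score" f) with hb6 | hb6 <;> simp only [hb6, Bool.false_eq_true, Bool.false_or, Bool.true_or, if_false, if_true] <;> try rfl
  rcases Bool.eq_false_or_eq_true (PySem.Str.isIn "probability" f) with hb7 | hb7 <;> simp only [hb7, Bool.false_eq_true, Bool.false_or, Bool.true_or, if_false, if_true] <;> try rfl
  rcases Bool.eq_false_or_eq_true (PySem.Str.isIn "factor" f) with hb8 | hb8 <;> simp only [hb8, Bool.false_eq_true, Bool.false_or, Bool.true_or, if_false, if_true] <;> try rfl
  rcases Bool.eq_false_or_eq_true (PySem.Str.isIn "weight" f) with hb9 | hb9 <;> simp only [hb9, Bool.false_eq_true, Bool.false_or, Bool.true_or, if_false, if_true] <;> try rfl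
  rcases Bool.eq_false_or_eq_true (PySem.Str.isIn "epsilon" f) with hb10 | hb10 <;> simp only [hb10, Bool.false_eq_true, Bool.false_or, Bool.true_or, if_false, if_true] <;> try rfl
  rcases Bool.eq_false_or_eq_true (PySem.Str.isIn "prior" f) with hb11 | hb11 <;> simp only [hb11, Bool.false_eq_true, Bool.false_or, Bool.true_or, if_false, if_true] <;> try rfl
  rcases Bool.eq_false_or_eq_true (PySem.Str.isIn "similarity" f) with hb12 | hb12 <;> simp only [hb12, Bool.false_eq_true, Bool.false_or, Bool.true_or, if_false, if_true] <;> try rfl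
  rcases Bool.eq_false_or_eq_true (PySem.Str.isIn "delta" f) with hb13 | hb13 <;> simp only [hb13, Bool.false_eq_true, Bool.false_or, Bool.true_or, if_false, if_true] <;> try rfl
  rcases Bool.eq_false_or_eq_true (PySem.Str.isIn "rate" f) with hb14 | hb14 <;> simp only [hb14, Bool.false_eq_true, Bool.false_or, Bool.true_or, if_false, if_true] <;> try rfl
  rcases Bool.eq_false_or_eq_true (PySem.Str.isIn "tolerance" f) with hb15 | hb15 <;> simp only [hb15, Bool.false_eq_true, Bool.false_or, Bool.true_or, if_false, if_true] <;> try rfl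
  rcases Bool.eq_false_or_eq_true (PySem.Str.isIn "penalty" f) with hb16 | hb16 <;> simp only [hb16, Bool.false_eq_true, Bool.false_or, Bool.true_or, if_false, if_true] <;> cases i <;> rfl
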